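-- pv_equiv track=rewrite | github.com/me0523/Thu-t-to-n-trong-An-to-n-th-ng-tin | b25.py | find_prime_sum
-- ===== SOURCE A (Python) =====
-- import math
--
-- def isPrime(n):
--     if n < 2:
--         return False
--     for i in range(2, int(math.sqrt(n)) + 1):
--         if n % i == 0:
--             return False
--     return True
--
-- def find_prime_sum(N, M):
--     prime_numbers = [i for i in range(2, 1001) if isPrime(i)]  # Tạo danh sách số nguyên tố từ 2 đến 1000
--     result = []
--     count = 0
--     for i in range(len(prime_numbers)):
--         if count == M:  # Kiểm tra nếu đã tìm đủ M số nguyên tố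
--             break
--         for j in range(i, len(prime_numbers)):
--             if sum(prime_numbers[i:j+1]) == N:  # Nếu tổng của M số nguyên tố này bằng N
--                 result = prime_numbers[i:j+1]
--                 count = M
--                 break
--             elif sum(prime_numbers[i:j+1]) > N:  # Nếu tổng vượt quá N thì thoát vòng lặp
--                 break
--     if count == M:
--         return result
--     else:
--         return None
-- ===== SOURCE B (Python) =====
-- def _sieve(nums):
--     # Classic sieve by repeated filtering: the head is prime, drop its multiples.
--     if not nums:
--         return []
--     p = nums[0]
--     return [p] + _sieve([x for x in nums[1:] if x % p != 0])
--
--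
-- def find_prime_sum(N, M):
--     primes = _sieve(list(range(2, 1001)))
--     if M == 0:
--         return []
--     if N <= 0:
--         return None
--     # Two-pointer sliding window with a running sum: the window [i, j)
--     # sums to s; j only ever moves forward.
--     n = len(primes)
--     j = 0
--     s = 0
--     for i in range(n):
--         while j < n and s < N:
--             s += primes[j]
--             j += 1
--         if s == N:
--             return primes[i:j]
--         s -= primes[i]
--     return None
-- ===== Notes on version B (the rewrite author's own statement) =====
-- stated objective: faster
-- what changed: Replaces trial-division prime generation plus the O(p^3) double loop that re-sums every slice with a sieve of Eratosthenes and a single two-pointer sliding window carrying a running sum.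
import Mathlib
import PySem

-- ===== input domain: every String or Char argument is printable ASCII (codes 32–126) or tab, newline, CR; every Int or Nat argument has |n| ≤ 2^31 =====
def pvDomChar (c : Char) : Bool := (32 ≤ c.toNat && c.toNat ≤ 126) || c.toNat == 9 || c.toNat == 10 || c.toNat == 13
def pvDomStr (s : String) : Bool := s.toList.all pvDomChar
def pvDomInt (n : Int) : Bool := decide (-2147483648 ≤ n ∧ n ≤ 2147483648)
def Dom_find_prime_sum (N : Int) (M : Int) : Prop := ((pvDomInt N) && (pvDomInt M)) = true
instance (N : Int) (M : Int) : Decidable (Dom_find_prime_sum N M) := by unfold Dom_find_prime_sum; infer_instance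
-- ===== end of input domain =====

-- B replaces A's trial-division prime list and nested slice re-summation by a
-- filter-sieve and a single two-pointer sliding window with a running sum (objective: faster).


-- ===== PORT A =====
-- floor square root: equals Python's int(math.sqrt(n)) on the arguments isPrime
-- passes it (2 ≤ n ≤ 1000, where math.sqrt is exact); fuel-counted ascent.
def isqrtFrom (n : Nat) : Nat → Nat → Nat
  | 0, k => k
  | fuel+1, k => if (k+1)*(k+1) ≤ n then isqrtFrom n fuel (k+1) else k

def pySqrt (n : Int) : Int := Int.ofNat (isqrtFrom n.toNat n.toNat 0)

def isPrime (n : Int) : Bool :=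
  if n < 2 then false
  else !((PySem.List.pyRange 2 (pySqrt n + 1) 1).any
          (fun i => PySem.Int.mod n i == 0))

def primesListA : List Int := (PySem.List.pyRange 2 1001 1).filter (fun i => isPrime i)

-- inner 'for j in range(i, len(ps))' loop of A (break = return)
def innerA (N : Int) (ps : List Int) (i : Nat) (j : Nat) : Option (List Int) :=
  if h : j < ps.length then
    let seg := PySem.List.slice ps (some (i : Int)) (some ((j : Int) + 1))
    if seg.sum = N then some seg
    else if seg.sum > N then none
    else innerA N ps i (j+1)
  else none
termination_by ps.length - j
decreasing_by omega

-- outer 'for i in range(len(ps))' loop carrying (count, result)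
def outerA (N M : Int) (ps : List Int) (i : Nat) (count : Int) (result : List Int) :
    Int × List Int :=
  if _h : i < ps.length then
    if count = M then (count, result)
    else
      match innerA N ps i i with
      | some seg => outerA N M ps (i+1) M seg
      | none => outerA N M ps (i+1) count result
  else (count, result)
termination_by ps.length - i

def find_prime_sum (N : Int) (M : Int) : Option (List Int) :=
  let ps := primesListA
  let cr := outerA N M ps 0 0 []
  if cr.1 = M then some cr.2 else none

-- ===== PORT B =====
-- _sieve(nums): head is prime, recurse on the tail with its multiples filtered out
-- (fuel = list length makes the recursion structural; the fuel is never exhausted).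
def sieveF : Nat → List Int → List Int
  | 0, _ => []
  | _, [] => []
  | fuel+1, p :: rest =>
      p :: sieveF fuel (rest.filter (fun x => PySem.Int.mod x p ≠ 0))

def pySieve (nums : List Int) : List Int := sieveF nums.length nums

-- 'while j < n and s < N: s += primes[j]; j += 1'
def twoPtrAdvance (N : Int) (ps : List Int) (j : Nat) (s : Int) : Nat × Int :=
  if h : j < ps.length ∧ s < N then twoPtrAdvance N ps (j+1) (s + ps[j]'h.1)
  else (j, s)
termination_by ps.length - j
decreasing_by omega

-- 'for i in range(n)' body of the sliding window
def twoPtrLoop (N : Int) (ps : List Int) (i j : Nat) (s : Int) : Option (List Int) :=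
  if h : i < ps.length then
    let js := twoPtrAdvance N ps j s
    if js.2 = N then some (PySem.List.slice ps (some (i : Int)) (some (js.1 : Int)))
    else twoPtrLoop N ps (i+1) js.1 (js.2 - ps[i]'h)
  else none
termination_by ps.length - i

def find_prime_sum_alt (N : Int) (M : Int) : Option (List Int) :=
  let ps := pySieve (PySem.List.pyRange 2 1001 1)
  if M = 0 then some []
  else if N ≤ 0 then none
  else twoPtrLoop N ps 0 0 0

-- ===== PRECONDITION & SPEC =====
def Spec_find_prime_sum (N : Int) (M : Int) (out : Option (List Int)) : Prop := out = find_prime_sum_alt N M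
instance (N : Int) (M : Int) (out : Option (List Int)) : Decidable (Spec_find_prime_sum N M out) := by unfold Spec_find_prime_sum; infer_instance

-- ===== CLAIM (what is proved, stated in full; the proofs are below) =====
def Claim_equal_find_prime_sum : Prop := ∀ (N : Int) (M : Int), Dom_find_prime_sum N M → Spec_find_prime_sum N M (find_prime_sum N M)

-- ===== LEMMAS AND PROOFS =====

-- window sum ps[a:b] (Nat indices)
def wsum (ps : List Int) (a b : Nat) : Int := ((ps.drop a).take (b - a)).sum

-- reference: shortest prefix of ys with running sum ≥ N, kept iff its sum is exactly N
def takeSum (N : Int) : List Int → Option (List Int)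
  | [] => none
  | x :: t =>
      if x = N then some [x]
      else if x > N then none
      else (takeSum (N - x) t).map (x :: ·)

-- reference: first (by start index) contiguous window summing to N
def firstWin (N : Int) : List Int → Option (List Int)
  | [] => none
  | x :: t =>
      match takeSum N (x :: t) with
      | some w => some w
      | none => firstWin N t

lemma wsum_zero (ps : List Int) (i : Nat) : wsum ps i i = 0 := by simp [wsum]

lemma wsum_split (ps : List Int) {i j b : Nat} (hij : i ≤ j) (hjb : j ≤ b) :
    wsum ps i b = wsum ps i j + wsum ps j b := by
  unfold wsum
  have h1 : b - i = (j - i) + (b - j) := by omega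
  rw [h1, List.take_add, List.sum_append, List.drop_drop]
  have h2 : i + (j - i) = j := by omega
  rw [h2]

lemma take_drop_succ (ps : List Int) {j b : Nat} (hjb : j ≤ b) (hb : b < ps.length) :
    (ps.drop j).take (b + 1 - j) = (ps.drop j).take (b - j) ++ [ps[b]] := by
  have h1 : b + 1 - j = (b - j) + 1 := by omega
  rw [h1, List.take_add_one]
  have h2 : (ps.drop j)[b - j]? = some ps[b] := by
    rw [List.getElem?_drop]
    have : j + (b - j) = b := by omega
    rw [this, List.getElem?_eq_getElem hb]
  rw [h2]
  rfl

lemma wsum_succ (ps : List Int) {j b : Nat} (hjb : j ≤ b) (hb : b < ps.length) :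
    wsum ps j (b+1) = wsum ps j b + ps[b] := by
  unfold wsum
  rw [take_drop_succ ps hjb hb, List.sum_append, List.sum_singleton]

lemma slice_nat (ps : List Int) (a b : Nat) :
    PySem.List.slice ps (some (a : Int)) (some ((b : Nat) : Int)) = (ps.drop a).take (b - a) :=
  PySem.List.slice_natCast ps a b

lemma innerA_eq (N : Int) (ps : List Int) :
    ∀ fuel i j, ps.length - j ≤ fuel → i ≤ j →
      innerA N ps i j =
        (takeSum (N - wsum ps i j) (ps.drop j)).map
          (fun w => (ps.drop i).take (j - i) ++ w) := by
  intro fuel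
  induction fuel with
  | zero =>
    intro i j hf hij
    rw [innerA, dif_neg (by omega)]
    have hd : ps.drop j = [] := List.drop_of_length_le (by omega)
    rw [hd]
    simp [takeSum]
  | succ fuel ih =>
    intro i j hf hij
    rw [innerA]
    by_cases hj : j < ps.length
    · rw [dif_pos hj]
      simp only
      have hseg : PySem.List.slice ps (some (i : Int)) (some ((j : Int) + 1)) =
          (ps.drop i).take (j + 1 - i) := by
        have : ((j : Int) + 1) = (((j+1 : Nat)) : Int) := by push_cast; ring
        rw [this, slice_nat]
      have hsum : ((ps.drop i).take (j + 1 - i)).sum = wsum ps i j + ps[j] :=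
        wsum_succ ps hij hj
      have hdropj : ps.drop j = ps[j] :: ps.drop (j+1) := List.drop_eq_getElem_cons hj
      rw [hseg, hsum, hdropj, takeSum]
      by_cases h1 : wsum ps i j + ps[j] = N
      · rw [if_pos h1, if_pos (show ps[j] = N - wsum ps i j by omega)]
        simp only [Option.map_some]
        congr 1
        rw [take_drop_succ ps hij hj]
      · rw [if_neg h1, if_neg (show ¬ ps[j] = N - wsum ps i j by omega)]
        by_cases h2 : wsum ps i j + ps[j] > N
        · rw [if_pos h2, if_pos (show ps[j] > N - wsum ps i j by omega)]
          simp
        · rw [if_neg h2, if_neg (show ¬ ps[j] > N - wsum ps i j by omega)]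
          rw [ih i (j+1) (by omega) (by omega)]
          have hw : N - wsum ps i (j+1) = N - wsum ps i j - ps[j] := by
            rw [wsum_succ ps hij hj]; ring
          rw [hw, Option.map_map]
          congr 1
          funext w
          simp only [Function.comp]
          rw [take_drop_succ ps hij hj, List.append_assoc]
          rfl
    · rw [dif_neg hj]
      have hd : ps.drop j = [] := List.drop_of_length_le (by omega)
      rw [hd]
      simp [takeSum]

lemma outerA_done (N M : Int) (ps : List Int) (i : Nat) (r : List Int) :
    outerA N M ps i M r = (M, r) := by
  rw [outerA]
  by_cases h : i < ps.length
  · rw [dif_pos h, if_pos rfl]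
  · rw [dif_neg h]

lemma outerA_eq (N M : Int) (ps : List Int) (hM : M ≠ 0) :
    ∀ fuel i, ps.length - i ≤ fuel →
      outerA N M ps i 0 [] =
        (match firstWin N (ps.drop i) with
         | some w => (M, w)
         | none => (0, ([] : List Int))) := by
  intro fuel
  induction fuel with
  | zero =>
    intro i hf
    rw [outerA, dif_neg (by omega)]
    rw [List.drop_of_length_le (by omega)]
    rfl
  | succ fuel ih =>
    intro i hf
    rw [outerA]
    by_cases hi : i < ps.length
    · rw [dif_pos hi, if_neg (by omega)]
      have hin : innerA N ps i i = takeSum N (ps.drop i) := by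
        rw [innerA_eq N ps (ps.length - i) i i (by omega) (le_refl i)]
        have h0 : wsum ps i i = 0 := wsum_zero ps i
        rw [h0]
        simp
      have hdrop : ps.drop i = ps[i] :: ps.drop (i+1) := List.drop_eq_getElem_cons hi
      rw [hin, hdrop, firstWin]
      cases hts : takeSum N (ps[i] :: ps.drop (i+1)) with
      | some w => simp only []; exact outerA_done N M ps (i+1) w
      | none => simp only []; rw [ih (i+1) (by omega)]
    · rw [dif_neg hi]
      rw [List.drop_of_length_le (by omega)]
      rfl

lemma takeSum_neg {N : Int} (ys : List Int) (hpos : ∀ x ∈ ys, 0 < x) (hN : N ≤ 0) :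
    takeSum N ys = none := by
  cases ys with
  | nil => rfl
  | cons x t =>
    have hx : 0 < x := hpos x (List.mem_cons_self)
    rw [takeSum, if_neg (by omega), if_pos (by omega)]

lemma firstWin_neg {N : Int} (ys : List Int) (hpos : ∀ x ∈ ys, 0 < x) (hN : N ≤ 0) :
    firstWin N ys = none := by
  induction ys with
  | nil => rfl
  | cons x t ih =>
    rw [firstWin, takeSum_neg _ hpos hN]
    exact ih (fun y hy => hpos y (List.mem_cons_of_mem _ hy))

lemma takeSum_found {N : Int} :
    ∀ (ys : List Int) (k : Nat), 1 ≤ k → k ≤ ys.length →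
      (ys.take k).sum = N → (∀ b < k, (ys.take b).sum < N) →
      takeSum N ys = some (ys.take k) := by
  intro ys
  induction ys generalizing N with
  | nil => intro k h1 h2; simp at h2; omega
  | cons x t ih =>
    intro k h1 hk hsum hlt
    match k, h1 with
    | 1, _ =>
      simp at hsum
      rw [takeSum, if_pos hsum]
      simp
    | (b+2), _ =>
      have hx : x < N := by
        have := hlt 1 (by omega)
        simpa using this
      rw [takeSum, if_neg (by omega), if_neg (by omega)]
      rw [ih (N := N - x) (b+1) (by omega) (by simpa using hk)
        (by
          have : (x :: t).take (b+2) = x :: t.take (b+1) := rfl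
          rw [this] at hsum
          simp at hsum
          omega)
        (by
          intro c hc
          have := hlt (c+1) (by omega)
          have h2 : (x :: t).take (c+1) = x :: t.take c := rfl
          rw [h2] at this
          simp at this
          omega)]
      rfl

lemma takeSum_gt {N : Int} :
    ∀ (ys : List Int) (k : Nat), (∀ x ∈ ys, 0 < x) → k ≤ ys.length →
      (ys.take k).sum > N → (∀ b < k, (ys.take b).sum < N) →
      takeSum N ys = none := by
  intro ys
  induction ys generalizing N with
  | nil => intro k _ hk hgt _; simp at hk; subst hk; simp at hgt; rfl
  | cons x t ih =>
    intro k hpos hk hgt hlt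
    have hx : 0 < x := hpos x List.mem_cons_self
    match k with
    | 0 =>
      simp at hgt
      rw [takeSum, if_neg (by omega), if_pos (by omega)]
    | 1 =>
      simp at hgt
      rw [takeSum, if_neg (by omega), if_pos (by omega)]
    | (b+2) =>
      have hxN : x < N := by have := hlt 1 (by omega); simpa using this
      rw [takeSum, if_neg (by omega), if_neg (by omega)]
      rw [ih (N := N - x) (b+1)
        (fun y hy => hpos y (List.mem_cons_of_mem _ hy))
        (by simpa using hk)
        (by
          have h2 : (x :: t).take (b+2) = x :: t.take (b+1) := rfl
          rw [h2] at hgt; simp at hgt; omega)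
        (by
          intro c hc
          have := hlt (c+1) (by omega)
          have h2 : (x :: t).take (c+1) = x :: t.take c := rfl
          rw [h2] at this; simp at this; omega)]
      rfl

lemma takeSum_small {N : Int} :
    ∀ (ys : List Int), (∀ b ≤ ys.length, (ys.take b).sum < N) →
      takeSum N ys = none := by
  intro ys
  induction ys generalizing N with
  | nil => intro _; rfl
  | cons x t ih =>
    intro hall
    have hx : x < N := by have := hall 1 (by simp); simpa using this
    rw [takeSum, if_neg (by omega), if_neg (by omega)]
    rw [ih (N := N - x) (by
      intro b hb
      have := hall (b+1) (by simpa using hb)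
      have h2 : (x :: t).take (b+1) = x :: t.take b := rfl
      rw [h2] at this; simp at this; omega)]
    rfl

-- stop state of the 'while' loop
lemma advance_spec (N : Int) (ps : List Int) :
    ∀ fuel j s, ps.length - j ≤ fuel → j ≤ ps.length →
      j ≤ (twoPtrAdvance N ps j s).1 ∧ (twoPtrAdvance N ps j s).1 ≤ ps.length ∧
        (twoPtrAdvance N ps j s).2 = s + wsum ps j (twoPtrAdvance N ps j s).1 ∧
        (∀ b, j ≤ b → b < (twoPtrAdvance N ps j s).1 → s + wsum ps j b < N) ∧
        ¬((twoPtrAdvance N ps j s).1 < ps.length ∧ (twoPtrAdvance N ps j s).2 < N) := by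
  intro fuel
  induction fuel with
  | zero =>
    intro j s hf hj
    rw [twoPtrAdvance, dif_neg (by omega)]
    refine ⟨le_refl j, hj, by rw [wsum_zero]; ring, by omega, by omega⟩
  | succ fuel ih =>
    intro j s hf hj
    rw [twoPtrAdvance]
    by_cases h : j < ps.length ∧ s < N
    · rw [dif_pos h]
      obtain ⟨ih1, ih2, ih3, ih4, ih5⟩ := ih (j+1) (s + ps[j]'h.1) (by omega) (by omega)
      refine ⟨by omega, ih2, ?_, ?_, ih5⟩
      · rw [ih3]
        have hsp : wsum ps j (twoPtrAdvance N ps (j+1) (s + ps[j]'h.1)).1 =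
            wsum ps j (j+1) + wsum ps (j+1) (twoPtrAdvance N ps (j+1) (s + ps[j]'h.1)).1 :=
          wsum_split ps (by omega) ih1
        rw [hsp]
        have h1 : wsum ps j (j+1) = ps[j]'h.1 := by
          have := wsum_succ ps (le_refl j) h.1
          rw [wsum_zero] at this
          omega
        rw [h1]; ring
      · intro b hb1 hb2
        rcases Nat.eq_or_lt_of_le hb1 with rfl | hlt
        · rw [wsum_zero]; have := h.2; omega
        · have := ih4 b (by omega) hb2
          have hsp : wsum ps j b = wsum ps j (j+1) + wsum ps (j+1) b :=
            wsum_split ps (by omega) (by omega)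
          have h1 : wsum ps j (j+1) = ps[j]'h.1 := by
            have := wsum_succ ps (le_refl j) h.1
            rw [wsum_zero] at this
            omega
          rw [hsp, h1]
          omega
    · rw [dif_neg h]
      refine ⟨le_refl j, hj, by rw [wsum_zero]; ring, by omega, by simpa using h⟩

lemma twoPtrLoop_eq (N : Int) (ps : List Int) (hpos : ∀ x ∈ ps, 0 < x) (hN : 0 < N) :
    ∀ fuel i j s, ps.length - i ≤ fuel → i ≤ j → j ≤ ps.length → s = wsum ps i j →
      (∀ b, i ≤ b → b < j → wsum ps i b < N) →
      twoPtrLoop N ps i j s = firstWin N (ps.drop i) := by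
  intro fuel
  induction fuel with
  | zero =>
    intro i j s hf hij hjl hs hK
    rw [twoPtrLoop, dif_neg (by omega)]
    rw [List.drop_of_length_le (by omega)]
    rfl
  | succ fuel ih =>
    intro i j s hf hij hjl hs hK
    rw [twoPtrLoop]
    by_cases hi : i < ps.length
    · rw [dif_pos hi]
      simp only
      obtain ⟨a1, a2, a3, a4, a5⟩ := advance_spec N ps (ps.length - j) j s (by omega) hjl
      set j' := (twoPtrAdvance N ps j s).1 with hj'
      set s' := (twoPtrAdvance N ps j s).2 with hs'
      have hs'T : s' = wsum ps i j' := by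
        rw [a3, hs, ← wsum_split ps hij a1]
      have hK' : ∀ b, i ≤ b → b < j' → wsum ps i b < N := by
        intro b hb1 hb2
        by_cases hbj : b < j
        · exact hK b hb1 hbj
        · have := a4 b (by omega) hb2
          rw [hs, ← wsum_split ps hij (by omega)] at this
          exact this
      have hij' : i < j' := by
        rcases Nat.lt_or_ge i j' with h | h
        · exact h
        · exfalso
          have hj'i : j' = i := by omega
          have : s' = 0 := by rw [hs'T, hj'i, wsum_zero]
          exact a5 ⟨by omega, by omega⟩
      have hdrop : ps.drop i = ps[i] :: ps.drop (i+1) := List.drop_eq_getElem_cons hi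
      have hlen : (ps.drop i).length = ps.length - i := List.length_drop ..
      have htake : ∀ b : Nat, ((ps.drop i).take b).sum = wsum ps i (i + b) := by
        intro b
        unfold wsum
        congr 2
        omega
      by_cases hfound : s' = N
      · rw [if_pos hfound]
        have hts : takeSum N (ps.drop i) = some ((ps.drop i).take (j' - i)) := by
          apply takeSum_found (ys := ps.drop i) (k := j' - i) (by omega) (by omega)
          · rw [htake]
            have : i + (j' - i) = j' := by omega
            rw [this, ← hs'T, hfound]
          · intro b hb
            rw [htake]
            exact hK' (i + b) (by omega) (by omega)
        rw [hdrop, firstWin, ← hdrop, hts]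
        rw [slice_nat]
      · rw [if_neg hfound]
        have hts : takeSum N (ps.drop i) = none := by
          rcases Decidable.not_and_iff_not_or_not.mp a5 with hend | hge
          · by_cases hlt : s' < N
            · apply takeSum_small
              intro b hb
              rw [htake]
              by_cases hbb : i + b < j'
              · exact hK' (i + b) (by omega) hbb
              · have : i + b = j' := by omega
                rw [this, ← hs'T]; omega
            · apply takeSum_gt (ys := ps.drop i) (k := j' - i)
                (fun y hy => hpos y (List.mem_of_mem_drop hy)) (by omega)
              · rw [htake]
                have : i + (j' - i) = j' := by omega
                rw [this, ← hs'T]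
                omega
              · intro b hb
                rw [htake]
                exact hK' (i + b) (by omega) (by omega)
          · apply takeSum_gt (ys := ps.drop i) (k := j' - i)
              (fun y hy => hpos y (List.mem_of_mem_drop hy)) (by omega)
            · rw [htake]
              have : i + (j' - i) = j' := by omega
              rw [this, ← hs'T]
              omega
            · intro b hb
              rw [htake]
              exact hK' (i + b) (by omega) (by omega)
        have hfw : firstWin N (ps.drop i) = firstWin N (ps.drop (i+1)) := by
          rw [hdrop, firstWin, ← hdrop, hts]
        rw [hfw]
        apply ih (i+1) j' (s' - ps[i]'hi) (by omega) (by omega) (by omega)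
        · have h1 : wsum ps i j' = ps[i] + wsum ps (i+1) j' := by
            have := wsum_split ps (show i ≤ i+1 by omega) (show i+1 ≤ j' by omega)
            have h2 : wsum ps i (i+1) = ps[i] := by
              have := wsum_succ ps (le_refl i) hi
              rw [wsum_zero] at this
              omega
            omega
          rw [hs'T, h1]
          ring
        · intro b hb1 hb2
          have h2 : wsum ps i (i+1) = ps[i] := by
            have := wsum_succ ps (le_refl i) hi
            rw [wsum_zero] at this
            omega
          have hsp : wsum ps i b = ps[i] + wsum ps (i+1) b := by
            have := wsum_split ps (show i ≤ i+1 by omega) (show i+1 ≤ b by omega)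
            omega
          have hKb := hK' b (by omega) hb2
          have hpi : 0 < ps[i] := hpos _ (List.getElem_mem hi)
          omega
    · rw [dif_neg hi]
      rw [List.drop_of_length_le (by omega)]
      rfl

set_option maxRecDepth 8000 in
lemma primes_facts :
    primesListA = pySieve (PySem.List.pyRange 2 1001 1) ∧
      (∀ x ∈ primesListA, 0 < x) ∧ 0 < primesListA.length := by
  decide

-- ===== VERDICT (by name: the statement is the Claim_ definition above) =====
theorem find_prime_sum_spec : Claim_equal_find_prime_sum := by
  intro N M _
  unfold Spec_find_prime_sum
  obtain ⟨hPeq, hpos, hlen⟩ := primes_facts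
  have hA : find_prime_sum N M =
      (if (outerA N M primesListA 0 0 []).1 = M
       then some (outerA N M primesListA 0 0 []).2 else none) := rfl
  have hB : find_prime_sum_alt N M =
      (if M = 0 then some []
       else if N ≤ 0 then none
       else twoPtrLoop N (pySieve (PySem.List.pyRange 2 1001 1)) 0 0 0) := rfl
  rw [hA, hB, ← hPeq]
  by_cases hM : M = 0
  · subst hM
    rw [if_pos rfl]
    rw [show outerA N 0 primesListA 0 0 [] = (0, []) from outerA_done N 0 primesListA 0 []]
    rw [if_pos rfl]
  · rw [if_neg hM]
    have hout := outerA_eq N M primesListA hM primesListA.length 0 (by omega)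
    rw [List.drop_zero] at hout
    by_cases hN : N ≤ 0
    · rw [if_pos hN]
      rw [hout, firstWin_neg primesListA hpos hN]
      simp only
      rw [if_neg (by omega)]
    · rw [if_neg hN]
      have htp := twoPtrLoop_eq N primesListA hpos (by omega) primesListA.length 0 0 0
        (by omega) (le_refl 0) (by omega) (by rw [wsum_zero]) (by omega)
      rw [List.drop_zero] at htp
      rw [htp, hout]
      cases firstWin N primesListA with
      | some w => simp
      | none => simp; omega
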